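-- pv_equiv track=rewrite | github.com/BenTildark/sprockets-d | DTEC501_Lab11_1_4/lab_11_1_4_q1.py | check_computer_name
-- ===== SOURCE A (Python) =====
-- def check_computer_name(entry):
--
--     """returns true if valid computer name for block S computing"""
--
--     # initializing variables
--     block = "S"
--     valid_room_20 = ['264', '267', '268']
--     valid_room_22 = ['265']
--     one_to_20 = range(1, 21)
--     one_to_22 = range(1, 23)
--
--     # set list assignment for compiling valid computer names
--     valid_pc_name = []
--
--     # hash out valid computer name & store in valid_pc_name
--     for room_number in valid_room_20:
--         for pc_number in one_to_20:
--             if pc_number in range(1, 10):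
--                 pc_number = "0" + str(pc_number)
--             valid_pc = block + room_number + "-" + str(pc_number)
--             valid_pc_name.append(valid_pc)
--
--     for room_number in valid_room_22:
--         for pc_number in one_to_22:
--             if pc_number in range(1,10):
--                 pc_number = "0" + str(pc_number)
--             valid_pc = block + room_number + "-" + str(pc_number)
--             valid_pc_name.append(valid_pc)
--
--     # validate True if entry in our list
--     if entry.replace('"', '') in valid_pc_name:
--         return True
--     else:
--         return False
-- ===== SOURCE B (Python) =====
-- def check_computer_name(entry):
--     """returns true if valid computer name for block S computing"""
--     name = entry.replace('"', '')
--     if not name.startswith('S'):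
--         return False
--     room, sep, pc = name[1:].partition('-')
--     if sep != '-':
--         return False
--     if room in ('264', '267', '268'):
--         limit = 20
--     elif room == '265':
--         limit = 22
--     else:
--         limit = 0
--     if len(pc) == 2 and pc[0].isdigit() and pc[1].isdigit():
--         v = 10 * (ord(pc[0]) - 48) + (ord(pc[1]) - 48)
--         return 1 <= v <= limit
--     return False
-- ===== Notes on version B (the rewrite author's own statement) =====
-- stated objective: simpler
-- what changed: B strips quotes and parses the name directly (prefix 'S', room token mapped to its per-room maximum, zero-padded two-digit pc token checked arithmetically) instead of generating all 82 valid names with nested loops and testing list membership.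
import Mathlib
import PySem

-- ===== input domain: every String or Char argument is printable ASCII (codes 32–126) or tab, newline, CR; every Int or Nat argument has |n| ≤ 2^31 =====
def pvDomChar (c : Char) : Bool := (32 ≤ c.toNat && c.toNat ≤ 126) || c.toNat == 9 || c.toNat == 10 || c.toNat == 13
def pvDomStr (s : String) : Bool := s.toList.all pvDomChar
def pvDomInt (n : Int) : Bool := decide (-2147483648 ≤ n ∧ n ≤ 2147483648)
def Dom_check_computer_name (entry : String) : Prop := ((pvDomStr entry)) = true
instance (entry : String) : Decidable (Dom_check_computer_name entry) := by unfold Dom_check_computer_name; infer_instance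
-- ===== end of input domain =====

-- B strips quotes then parses the name directly (prefix 'S', room token, zero-padded pc token)
-- instead of enumerating all 82 valid names and testing membership: simpler and a different algorithm.

-- ===== PORT A =====
-- A-side helper: the valid_pc_name list built by A's two nested loops
-- ('pc_number in range(1, 10)' is ported as 1 ≤ pc_number ∧ pc_number < 10)
def pvValidNames : List String :=
  let block := "S"
  let valid_room_20 : List String := ["264", "267", "268"]
  let valid_room_22 : List String := ["265"]
  let one_to_20 := PySem.List.pyRange 1 21 1
  let one_to_22 := PySem.List.pyRange 1 23 1
  let l1 := valid_room_20.foldl (fun acc room_number =>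
    one_to_20.foldl (fun acc pc_number =>
      let pcs := if 1 ≤ pc_number ∧ pc_number < 10
                 then "0" ++ PySem.Int.toStr pc_number else PySem.Int.toStr pc_number
      acc ++ [block ++ room_number ++ "-" ++ pcs]) acc) []
  valid_room_22.foldl (fun acc room_number =>
    one_to_22.foldl (fun acc pc_number =>
      let pcs := if 1 ≤ pc_number ∧ pc_number < 10
                 then "0" ++ PySem.Int.toStr pc_number else PySem.Int.toStr pc_number
      acc ++ [block ++ room_number ++ "-" ++ pcs]) acc) l1

def check_computer_name (entry : String) : Bool :=
  if PySem.Str.replace entry "\"" "" ∈ pvValidNames then true else false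

-- ===== PORT B =====
-- B-side helper: Source B's body after the quote-strip; str.partition('-') is ported as
-- takeWhile/dropWhile at the first '-', ord(c) - 48 as c.toNat - 48.
def pvCheckName (name : String) : Bool :=
  match name.toList with
  | [] => false                                   -- not name.startswith('S')
  | c :: body =>
    if c ≠ 'S' then false
    else
      let room := body.takeWhile (fun ch => ch != '-')
      let rest := body.dropWhile (fun ch => ch != '-')
      if rest = [] then false                     -- sep ≠ '-'
      else
        let limit : Nat :=
          if room = ['2', '6', '4'] ∨ room = ['2', '6', '7'] ∨ room = ['2', '6', '8'] then 20
          else if room = ['2', '6', '5'] then 22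
          else 0
        match rest.tail with                      -- pc
        | [d1, d2] =>
          if d1.isDigit && d2.isDigit then
            decide (1 ≤ 10 * (d1.toNat - 48) + (d2.toNat - 48) ∧
                    10 * (d1.toNat - 48) + (d2.toNat - 48) ≤ limit)
          else false
        | _ => false

def check_computer_name_alt (entry : String) : Bool :=
  pvCheckName (PySem.Str.replace entry "\"" "")

-- ===== PRECONDITION & SPEC =====
def Spec_check_computer_name (entry : String) (out : Bool) : Prop := out = check_computer_name_alt entry
instance (entry : String) (out : Bool) : Decidable (Spec_check_computer_name entry out) := by unfold Spec_check_computer_name; infer_instance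

-- ===== CLAIM (what is proved, stated in full; the proofs are below) =====
def Claim_equal_check_computer_name : Prop := ∀ (entry : String), Dom_check_computer_name entry → Spec_check_computer_name entry (check_computer_name entry)

-- ===== LEMMAS AND PROOFS =====
def pvL : List String := ["S264-01", "S264-02", "S264-03", "S264-04", "S264-05", "S264-06",
"S264-07", "S264-08", "S264-09", "S264-10", "S264-11", "S264-12", "S264-13", "S264-14", "S264-15",
"S264-16", "S264-17", "S264-18", "S264-19", "S264-20", "S267-01", "S267-02", "S267-03", "S267-04",
"S267-05", "S267-06", "S267-07", "S267-08", "S267-09", "S267-10", "S267-11", "S267-12", "S267-13",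
"S267-14", "S267-15", "S267-16", "S267-17", "S267-18", "S267-19", "S267-20", "S268-01", "S268-02",
"S268-03", "S268-04", "S268-05", "S268-06", "S268-07", "S268-08", "S268-09", "S268-10", "S268-11",
"S268-12", "S268-13", "S268-14", "S268-15", "S268-16", "S268-17", "S268-18", "S268-19", "S268-20",
"S265-01", "S265-02", "S265-03", "S265-04", "S265-05", "S265-06", "S265-07", "S265-08", "S265-09",
"S265-10", "S265-11", "S265-12", "S265-13", "S265-14", "S265-15", "S265-16", "S265-17", "S265-18",
"S265-19", "S265-20", "S265-21", "S265-22"]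

lemma pvValidNames_eq : pvValidNames = pvL := by decide

lemma pvDigit_bounds (c : Char) (h : c.isDigit = true) : 48 ≤ c.toNat ∧ c.toNat ≤ 57 := by
  simp [Char.isDigit, UInt32.le_iff_toNat_le] at h; exact h

lemma pvMem264 (a b : Nat) (ha : a ≤ 9) (hb : b ≤ 9) (h1 : 1 ≤ 10 * a + b) (h2 : 10 * a + b ≤ 20) :
    String.ofList ['S', '2', '6', '4', '-', Char.ofNat (48 + a), Char.ofNat (48 + b)] ∈ pvL := by
  interval_cases a <;> interval_cases b <;> first | omega | decide

lemma pvMem267 (a b : Nat) (ha : a ≤ 9) (hb : b ≤ 9) (h1 : 1 ≤ 10 * a + b) (h2 : 10 * a + b ≤ 20) :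
    String.ofList ['S', '2', '6', '7', '-', Char.ofNat (48 + a), Char.ofNat (48 + b)] ∈ pvL := by
  interval_cases a <;> interval_cases b <;> first | omega | decide

lemma pvMem268 (a b : Nat) (ha : a ≤ 9) (hb : b ≤ 9) (h1 : 1 ≤ 10 * a + b) (h2 : 10 * a + b ≤ 20) :
    String.ofList ['S', '2', '6', '8', '-', Char.ofNat (48 + a), Char.ofNat (48 + b)] ∈ pvL := by
  interval_cases a <;> interval_cases b <;> first | omega | decide

lemma pvMem265 (a b : Nat) (ha : a ≤ 9) (hb : b ≤ 9) (h1 : 1 ≤ 10 * a + b) (h2 : 10 * a + b ≤ 22) :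
    String.ofList ['S', '2', '6', '5', '-', Char.ofNat (48 + a), Char.ofNat (48 + b)] ∈ pvL := by
  interval_cases a <;> interval_cases b <;> first | omega | decide

lemma pvDropWhile_head (p : Char → Bool) (l t : List Char) (a : Char)
    (h : l.dropWhile p = a :: t) : p a = false := by
  induction l with
  | nil => simp at h
  | cons x xs ih =>
    rw [List.dropWhile_cons] at h
    by_cases hx : p x = true
    · exact ih (by simpa [hx] using h)
    · simp [hx] at h
      rw [← h.1]
      simpa using hx

lemma pvParse_mem (s : String) (hp : pvCheckName s = true) : s ∈ pvL := by
  unfold pvCheckName at hp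
  cases hl : s.toList with
  | nil => rw [hl] at hp; simp at hp
  | cons c body =>
    rw [hl] at hp
    simp only [] at hp
    by_cases hc : c = 'S'
    case neg => rw [if_pos (by simpa using hc)] at hp; exact absurd hp (by simp)
    subst hc
    rw [if_neg (by simp)] at hp
    cases hdw : body.dropWhile (fun ch => ch != '-') with
    | nil => rw [hdw] at hp; simp at hp
    | cons r0 rtail =>
      rw [hdw] at hp
      have hr0 : r0 = '-' := by
        have := pvDropWhile_head (fun ch => ch != '-') body rtail r0 hdw
        simpa using this
      subst hr0
      rw [if_neg (by simp), List.tail_cons] at hp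
      cases rtail with
      | nil => simp at hp
      | cons d1 t2 =>
        cases t2 with
        | nil => simp at hp
        | cons d2 t3 =>
          cases t3 with
          | cons e t4 => simp at hp
          | nil =>
            simp only [] at hp
            split_ifs at hp with hd h20 h22
            · -- rooms 264 / 267 / 268, limit 20
              obtain ⟨hd1, hd2⟩ : d1.isDigit = true ∧ d2.isDigit = true := by simpa using hd
              obtain ⟨ha1, ha2⟩ := pvDigit_bounds d1 hd1
              obtain ⟨hb1, hb2⟩ := pvDigit_bounds d2 hd2
              have hd' := of_decide_eq_true hp
              have e1 : Char.ofNat (48 + (d1.toNat - 48)) = d1 := by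
                rw [show 48 + (d1.toNat - 48) = d1.toNat by omega, Char.ofNat_toNat]
              have e2 : Char.ofNat (48 + (d2.toNat - 48)) = d2 := by
                rw [show 48 + (d2.toNat - 48) = d2.toNat by omega, Char.ofNat_toNat]
              have hb : body = List.takeWhile (fun ch => ch != '-') body ++ ['-', d1, d2] := by
                conv_lhs => rw [← List.takeWhile_append_dropWhile (p := fun ch => ch != '-') (l := body)]
                rw [hdw]
              rcases h20 with h | h | h
              · have hs2 : s = String.ofList ['S', '2', '6', '4', '-', d1, d2] := by
                  apply String.toList_inj.mp; rw [hl, hb, h]; simp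
                rw [hs2, ← e1, ← e2]
                exact pvMem264 _ _ (by omega) (by omega) (by omega) (by omega)
              · have hs2 : s = String.ofList ['S', '2', '6', '7', '-', d1, d2] := by
                  apply String.toList_inj.mp; rw [hl, hb, h]; simp
                rw [hs2, ← e1, ← e2]
                exact pvMem267 _ _ (by omega) (by omega) (by omega) (by omega)
              · have hs2 : s = String.ofList ['S', '2', '6', '8', '-', d1, d2] := by
                  apply String.toList_inj.mp; rw [hl, hb, h]; simp
                rw [hs2, ← e1, ← e2]
                exact pvMem268 _ _ (by omega) (by omega) (by omega) (by omega)
            · -- room 265, limit 22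
              obtain ⟨hd1, hd2⟩ : d1.isDigit = true ∧ d2.isDigit = true := by simpa using hd
              obtain ⟨ha1, ha2⟩ := pvDigit_bounds d1 hd1
              obtain ⟨hb1, hb2⟩ := pvDigit_bounds d2 hd2
              have hd' := of_decide_eq_true hp
              have e1 : Char.ofNat (48 + (d1.toNat - 48)) = d1 := by
                rw [show 48 + (d1.toNat - 48) = d1.toNat by omega, Char.ofNat_toNat]
              have e2 : Char.ofNat (48 + (d2.toNat - 48)) = d2 := by
                rw [show 48 + (d2.toNat - 48) = d2.toNat by omega, Char.ofNat_toNat]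
              have hb : body = List.takeWhile (fun ch => ch != '-') body ++ ['-', d1, d2] := by
                conv_lhs => rw [← List.takeWhile_append_dropWhile (p := fun ch => ch != '-') (l := body)]
                rw [hdw]
              have hs2 : s = String.ofList ['S', '2', '6', '5', '-', d1, d2] := by
                apply String.toList_inj.mp; rw [hl, hb, h22]; simp
              rw [hs2, ← e1, ← e2]
              exact pvMem265 _ _ (by omega) (by omega) (by omega) (by omega)
            · -- unknown room, limit 0: the pc bound is unsatisfiable
              have hd' := of_decide_eq_true hp
              omega

lemma pvMem_parse (s : String) (h : s ∈ pvL) : pvCheckName s = true := by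
  fin_cases h <;> decide

lemma pvKey (s : String) : (if s ∈ pvValidNames then true else false) = pvCheckName s := by
  rw [pvValidNames_eq]
  by_cases h : s ∈ pvL
  · rw [if_pos h, pvMem_parse s h]
  · rw [if_neg h]
    cases hps : pvCheckName s with
    | false => rfl
    | true => exact absurd (pvParse_mem s hps) h

-- ===== VERDICT (by name: the statement is the Claim_ definition above) =====
theorem check_computer_name_spec : Claim_equal_check_computer_name := by
  intro entry _
  unfold Spec_check_computer_name check_computer_name check_computer_name_alt
  exact pvKey _
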